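-- pv_equiv track=rewrite | github.com/coopsor/SVPG | script/get_gfa_depth.py | find_start_subregion
-- ===== SOURCE A (Python) =====
-- def find_start_subregion(subregions, query_start):
--     low, high = 0, len(subregions) - 1
--     while low <= high:
--         mid = (low + high) // 2
--         if subregions[mid][1] < query_start:
--             low = mid + 1
--         else:
--             high = mid - 1
--     return low
-- ===== SOURCE B (Python) =====
-- def find_start_subregion(subregions, query_start):
--     def search(seg, offset):
--         if not seg:
--             return offset
--         mid = (len(seg) - 1) // 2
--         if seg[mid][1] < query_start:
--             return search(seg[mid + 1:], offset + mid + 1)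
--         return search(seg[:mid], offset)
--     return search(subregions, 0)
-- ===== Notes on version B (the rewrite author's own statement) =====
-- stated objective: alternative
-- what changed: Index-based while-loop binary search over (low, high) is replaced by divide-and-conquer recursion on list segments: slice the list, probe the segment's own midpoint (len(seg)-1)//2, and recurse into seg[:mid] or seg[mid+1:] carrying an offset; it probes the same elements, so the returned index is identical even on unsorted input.
import Mathlib
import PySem

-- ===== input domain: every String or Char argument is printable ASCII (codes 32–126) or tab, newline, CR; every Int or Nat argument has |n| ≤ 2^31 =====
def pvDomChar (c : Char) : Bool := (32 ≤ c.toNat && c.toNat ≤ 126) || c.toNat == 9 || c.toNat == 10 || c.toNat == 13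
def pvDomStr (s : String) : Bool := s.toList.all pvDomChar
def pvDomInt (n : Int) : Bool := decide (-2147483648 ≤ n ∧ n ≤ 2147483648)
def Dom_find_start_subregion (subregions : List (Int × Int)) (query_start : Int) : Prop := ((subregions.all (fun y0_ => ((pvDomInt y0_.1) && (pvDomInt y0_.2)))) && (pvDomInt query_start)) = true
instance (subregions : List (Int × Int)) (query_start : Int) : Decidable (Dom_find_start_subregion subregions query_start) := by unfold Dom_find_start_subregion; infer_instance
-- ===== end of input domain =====

-- B replaces A's index-based while loop by divide-and-conquer on list SEGMENTS: it slices the list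
-- and recurses into seg[:mid] / seg[mid+1:] with an offset, probing the same elements (objective: alternative).


-- ===== PORT A =====
-- the while loop, step for step, as recursion on the state (low, high);
-- subregions[mid] is always in range on reachable states (0 ≤ low ≤ mid ≤ high < len),
-- so the .getD (0, 0) default is unreachable
def find_start_subregion_loop (subregions : List (Int × Int)) (query_start : Int)
    (low high : Int) : Int :=
  if low ≤ high then
    let mid := PySem.Int.floordiv (low + high) 2
    if ((PySem.List.pyGet? subregions mid).getD (0, 0)).2 < query_start then
      find_start_subregion_loop subregions query_start (mid + 1) high
    else
      find_start_subregion_loop subregions query_start low (mid - 1)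
  else low
termination_by (high + 1 - low).toNat
decreasing_by
  · have h := PySem.Int.floordiv_two_mid_bounds (by assumption : low ≤ high)
    omega
  · have h := PySem.Int.floordiv_two_mid_bounds (by assumption : low ≤ high)
    omega

def find_start_subregion (subregions : List (Int × Int)) (query_start : Int) : Int :=
  find_start_subregion_loop subregions query_start 0 ((subregions.length : Int) - 1)

-- ===== PORT B =====
-- Source B's helper search(seg, offset): recursion on the current SEGMENT (a slice of the list),
-- returning the offset when the segment is empty; seg[mid] with mid = (len(seg)-1)//2 is
-- always in range on a nonempty segment, so the .getD (0, 0) default is unreachable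
def find_start_subregion_search (query_start : Int)
    (seg : List (Int × Int)) (offset : Int) : Int :=
  if seg = [] then offset
  else
    let mid := PySem.Int.floordiv (PySem.List.len seg - 1) 2
    if ((PySem.List.pyGet? seg mid).getD (0, 0)).2 < query_start then
      find_start_subregion_search query_start
        (PySem.List.slice seg (some (mid + 1)) none) (offset + mid + 1)
    else
      find_start_subregion_search query_start
        (PySem.List.slice seg none (some mid)) offset
termination_by seg.length
decreasing_by
  all_goals
    rename_i hne _
    have hlen : 1 ≤ seg.length := List.length_pos_of_ne_nil hne
    simp only [PySem.List.len_eq,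
      PySem.Int.floordiv_eq_ediv_of_pos (by omega : (0:Int) < 2)]
  · rw [PySem.List.slice_from seg (by omega)]
    simp only [List.length_drop]
    omega
  · rw [PySem.List.slice_to seg (by omega)]
    simp only [List.length_take]
    omega

def find_start_subregion_alt (subregions : List (Int × Int)) (query_start : Int) : Int :=
  find_start_subregion_search query_start subregions 0

-- ===== PRECONDITION & SPEC =====
def Spec_find_start_subregion (subregions : List (Int × Int)) (query_start : Int) (out : Int) : Prop := out = find_start_subregion_alt subregions query_start
instance (subregions : List (Int × Int)) (query_start : Int) (out : Int) : Decidable (Spec_find_start_subregion subregions query_start out) := by unfold Spec_find_start_subregion; infer_instance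

-- ===== CLAIM (what is proved, stated in full; the proofs are below) =====
def Claim_equal_find_start_subregion : Prop := ∀ (subregions : List (Int × Int)) (query_start : Int), Dom_find_start_subregion subregions query_start → Spec_find_start_subregion subregions query_start (find_start_subregion subregions query_start)

-- ===== LEMMAS AND PROOFS =====
-- invariant: A's loop on [low, high] equals B's recursion on the segment subregions[low:high+1]
-- with offset low; strong induction on the interval size
theorem loop_eq_search (subregions : List (Int × Int)) (query_start : Int) :
    ∀ (n : Nat) (low high : Int), (high + 1 - low).toNat = n →
      0 ≤ low → -1 ≤ high → high < (subregions.length : Int) →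
      find_start_subregion_loop subregions query_start low high =
      find_start_subregion_search query_start
        ((subregions.drop low.toNat).take (high + 1 - low).toNat) low := by
  intro n
  induction n using Nat.strong_induction_on with
  | _ n ih =>
    intro low high hn h0 hm1 hh
    rw [find_start_subregion_loop, find_start_subregion_search]
    set seg := (subregions.drop low.toNat).take (high + 1 - low).toNat with hseg
    have hsl : seg.length = min (high + 1 - low).toNat (subregions.length - low.toNat) := by
      simp [hseg]
    by_cases hle : low ≤ high
    · have hmidA := PySem.Int.floordiv_two_mid_bounds hle
      set midA := PySem.Int.floordiv (low + high) 2 with hma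
      have hsl' : seg.length = (high + 1 - low).toNat := by omega
      have hne : ¬ (seg = []) := by
        intro h; rw [h] at hsl'; simp at hsl'; omega
      simp only [hle, if_true, hne, if_false]
      -- B's local midpoint equals A's global midpoint minus low
      have hmidB : PySem.Int.floordiv (PySem.List.len seg - 1) 2 = midA - low := by
        rw [PySem.List.len_eq, hsl', hma]
        rw [PySem.Int.floordiv_eq_ediv_of_pos (by omega : (0:Int) < 2),
            PySem.Int.floordiv_eq_ediv_of_pos (by omega : (0:Int) < 2)]
        omega
      rw [hmidB]
      -- the two probes read the same element
      have hprobe : PySem.List.pyGet? seg (midA - low) = PySem.List.pyGet? subregions midA := by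
        rw [PySem.List.pyGet?_of_nonneg (xs := seg) (i := midA - low) (by omega),
            PySem.List.pyGet?_of_nonneg (xs := subregions) (i := midA) (by omega),
            hseg, List.getElem?_take_of_lt (by omega), List.getElem?_drop]
        congr 1; omega
      rw [hprobe]
      by_cases hlt : ((PySem.List.pyGet? subregions midA).getD (0, 0)).2 < query_start
      · simp only [hlt, if_true]
        -- recurse right: seg[mid+1:] = subregions[midA+1 : high+1], offset low + mid + 1 = midA + 1
        have hslice : PySem.List.slice seg (some (midA - low + 1)) none =
            (subregions.drop (midA + 1).toNat).take (high + 1 - (midA + 1)).toNat := by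
          have e1 : (high + 1 - low).toNat - (midA - low + 1).toNat = (high + 1 - (midA + 1)).toNat := by omega
          have e2 : low.toNat + (midA - low + 1).toNat = (midA + 1).toNat := by omega
          rw [PySem.List.slice_from seg (a := midA - low + 1) (show (0:Int) ≤ midA - low + 1 by omega), hseg,
              List.drop_take, List.drop_drop, e1, e2]
        have hoff : low + (midA - low) + 1 = midA + 1 := by ring
        rw [hslice, hoff]
        exact ih ((high + 1 - (midA + 1)).toNat) (by omega) (midA + 1) high rfl
          (by omega) (by omega) hh
      · simp only [hlt, if_false]
        -- recurse left: seg[:mid] = subregions[low : midA], offset unchanged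
        have hslice : PySem.List.slice seg none (some (midA - low)) =
            (subregions.drop low.toNat).take ((midA - 1) + 1 - low).toNat := by
          rw [PySem.List.slice_to seg (b := midA - low) (show (0:Int) ≤ midA - low by omega), hseg, List.take_take]
          congr 1; omega
        rw [hslice]
        exact ih ((midA - 1 + 1 - low).toNat) (by omega) low (midA - 1) rfl
          h0 (by omega) (by omega)
    · have : seg = [] := by
        have : (high + 1 - low).toNat = 0 := by omega
        simp [hseg, this]
      simp [hle, this]

-- ===== VERDICT (by name: the statement is the Claim_ definition above) =====
theorem find_start_subregion_spec : Claim_equal_find_start_subregion := by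
  intro subregions query_start _
  unfold Spec_find_start_subregion find_start_subregion find_start_subregion_alt
  rw [loop_eq_search subregions query_start _ 0 _ rfl (by omega) (by omega) (by omega)]
  congr 1
  simp
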